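-- pv_equiv track=rewrite | github.com/SrtoPeixet/KnownPlaintextAttack | KnownPlainTextAttack.py | getArrOfHexBytes
-- ===== SOURCE A (Python) =====
-- def getArrOfHexBytes(data):
--     output = []
--     ctr = 0
--     for char in data:
--         if (ctr == 0):
--             tmp = char
--         else:
--             output.append(tmp+char)
--         ctr = 1 - ctr
--     return output
-- ===== SOURCE B (Python) =====
-- def getArrOfHexBytes(data):
--     it = iter(data)
--     return [a + b for a, b in zip(it, it)]
-- ===== Notes on version B (the rewrite author's own statement) =====
-- stated objective: idiomatic
-- what changed: Replaced the toggle counter with a carried tmp and an if/else branch by a single pass that zips one iterator with itself, consuming two characters per step in a comprehension (no per-char branch/state, fewer interpreter steps).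
import Mathlib
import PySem

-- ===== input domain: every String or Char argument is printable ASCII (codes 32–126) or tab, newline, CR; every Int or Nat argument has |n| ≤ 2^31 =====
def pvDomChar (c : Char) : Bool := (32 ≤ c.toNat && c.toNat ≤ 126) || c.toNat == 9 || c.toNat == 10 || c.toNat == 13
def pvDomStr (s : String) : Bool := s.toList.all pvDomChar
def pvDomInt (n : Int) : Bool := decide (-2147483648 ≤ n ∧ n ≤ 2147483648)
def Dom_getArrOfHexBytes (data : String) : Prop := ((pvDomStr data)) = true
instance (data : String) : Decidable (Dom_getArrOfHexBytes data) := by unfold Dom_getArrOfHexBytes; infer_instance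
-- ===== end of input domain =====

-- B replaces A's toggle counter and if/else branch by self-zip pairing (two chars per step); idiomatic, same cost.

-- ===== PORT A =====
-- loop state: (output, ctr, tmp); tmp starts as "" but is never read before being assigned (ctr starts at 0)
def getArrOfHexBytesStep (st : List String × Int × String) (c : Char) : List String × Int × String :=
  let (output, ctr, tmp) := st
  if ctr == 0 then (output, 1 - ctr, String.mk [c])
  else (output ++ [tmp ++ String.mk [c]], 1 - ctr, tmp)

def getArrOfHexBytes (data : String) : List String :=
  (data.toList.foldl getArrOfHexBytesStep ([], 0, "")).1

-- ===== PORT B =====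
-- zip(it, it) consumes two characters per step; a+b is the concatenation of the two one-char strings
def getArrOfHexBytesPairs : List Char → List String
  | a :: b :: rest => (String.mk [a] ++ String.mk [b]) :: getArrOfHexBytesPairs rest
  | _ => []

def getArrOfHexBytes_alt (data : String) : List String :=
  getArrOfHexBytesPairs data.toList

-- ===== PRECONDITION & SPEC =====
def Spec_getArrOfHexBytes (data : String) (out : List String) : Prop := out = getArrOfHexBytes_alt data
instance (data : String) (out : List String) : Decidable (Spec_getArrOfHexBytes data out) := by unfold Spec_getArrOfHexBytes; infer_instance

-- ===== CLAIM (what is proved, stated in full; the proofs are below) =====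
def Claim_equal_getArrOfHexBytes : Prop := ∀ (data : String), Dom_getArrOfHexBytes data → Spec_getArrOfHexBytes data (getArrOfHexBytes data)

-- ===== LEMMAS AND PROOFS =====
theorem getArrOfHexBytes_fold (l : List Char) :
    ∀ (out : List String) (ctr : Int) (tmp : String), (ctr = 0 ∨ ctr = 1) →
      (l.foldl getArrOfHexBytesStep (out, ctr, tmp)).1 =
        out ++ (if ctr == 0 then getArrOfHexBytesPairs l
                else match l with
                     | [] => []
                     | c :: rest => (tmp ++ String.mk [c]) :: getArrOfHexBytesPairs rest) := by
  induction l with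
  | nil => intro out ctr tmp _; split <;> simp [getArrOfHexBytesPairs]
  | cons c rest ih =>
    intro out ctr tmp hctr
    by_cases h : ctr == 0
    · simp only [List.foldl_cons, getArrOfHexBytesStep, h, if_true]
      have h0 : ctr = 0 := by simpa using h
      rw [ih _ _ _ (by omega)]
      have : (1 - ctr == 0) = false := by simp [h0]
      rw [this]
      cases rest <;> simp [getArrOfHexBytesPairs]
    · have h1 : ctr = 1 := hctr.resolve_left (by simpa using h)
      subst h1
      have hstep : getArrOfHexBytesStep (out, 1, tmp) c = (out ++ [tmp ++ String.mk [c]], 0, tmp) := by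
        simp [getArrOfHexBytesStep]
      rw [List.foldl_cons, hstep, ih _ _ _ (Or.inl rfl)]
      simp

-- ===== VERDICT (by name: the statement is the Claim_ definition above) =====
theorem getArrOfHexBytes_spec : Claim_equal_getArrOfHexBytes := by
  intro data _
  unfold Spec_getArrOfHexBytes getArrOfHexBytes getArrOfHexBytes_alt
  rw [getArrOfHexBytes_fold _ _ _ _ (Or.inl rfl)]
  simp
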